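-- pv_equiv track=rewrite | github.com/vivek-tumuluri/local-context-agent | app/rag/chunk.py | _split_paragraphs_preserving_code
-- ===== SOURCE A (Python) =====
-- from typing import Dict, List, Tuple, Optional
--
-- def _split_paragraphs_preserving_code(body: str) -> List[str]:
--     """
--     Split a body into paragraphs while keeping fenced code blocks as atomic paragraphs.
--     """
--     if not body:
--         return []
--
--     parts: List[str] = []
--     idx = 0
--     lines = body.split("\n")
--     in_code = False
--     buf: List[str] = []
--
--     for line in lines:
--         if line.strip().startswith("```"):
--
--             if not in_code:
--
--                 if buf and any(s.strip() for s in buf):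
--                     parts.append("\n".join(buf).strip())
--                 buf = [line]
--                 in_code = True
--             else:
--
--                 buf.append(line)
--                 parts.append("\n".join(buf).strip())
--                 buf = []
--                 in_code = False
--             continue
--
--         if in_code:
--             buf.append(line)
--             continue
--
--
--         if line.strip() == "":
--
--             if buf and any(s.strip() for s in buf):
--                 parts.append("\n".join(buf).strip())
--                 buf = []
--         else:
--             buf.append(line)
--
--     if buf and any(s.strip() for s in buf):
--         parts.append("\n".join(buf).strip())
--
--
--     return parts or [body.strip()]
-- ===== SOURCE B (Python) =====
-- from typing import List
--
-- def _take_code(lines: List[str]) -> tuple: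
--     """Lines of a code block after the opening fence, up to and including the
--     closing fence (or to the end if unclosed), plus the remaining lines."""
--     if not lines:
--         return [], []
--     if lines[0].strip().startswith("```"):
--         return [lines[0]], lines[1:]
--     seg, rest = _take_code(lines[1:])
--     return [lines[0]] + seg, rest
--
-- def _take_para(lines: List[str]) -> tuple:
--     """The maximal leading run of non-blank, non-fence lines, plus the rest."""
--     if not lines or lines[0].strip().startswith("```") or lines[0].strip() == "":
--         return [], lines
--     run, rest = _take_para(lines[1:])
--     return [lines[0]] + run, rest
--
-- def _go(lines: List[str]) -> List[str]:
--     if not lines: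
--         return []
--     head = lines[0]
--     if head.strip().startswith("```"):
--         seg, rest = _take_code(lines[1:])
--         return ["\n".join([head] + seg).strip()] + _go(rest)
--     if head.strip() == "":
--         return _go(lines[1:])
--     run, rest = _take_para(lines)
--     return ["\n".join(run).strip()] + _go(rest)
--
-- def _split_paragraphs_preserving_code(body: str) -> List[str]:
--     if not body:
--         return []
--     parts = _go(body.split("\n"))
--     return parts or [body.strip()]
-- ===== Notes on version B (the rewrite author's own statement) =====
-- stated objective: alternative
-- what changed: A's single pass driven by an in_code flag and a mutable line buffer is replaced by a recursive decomposition that repeatedly bites off one whole unit at a time (a complete fenced code block via _take_code, or a maximal run of non-blank lines via _take_para) and recurses on the remainder.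
import Mathlib
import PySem

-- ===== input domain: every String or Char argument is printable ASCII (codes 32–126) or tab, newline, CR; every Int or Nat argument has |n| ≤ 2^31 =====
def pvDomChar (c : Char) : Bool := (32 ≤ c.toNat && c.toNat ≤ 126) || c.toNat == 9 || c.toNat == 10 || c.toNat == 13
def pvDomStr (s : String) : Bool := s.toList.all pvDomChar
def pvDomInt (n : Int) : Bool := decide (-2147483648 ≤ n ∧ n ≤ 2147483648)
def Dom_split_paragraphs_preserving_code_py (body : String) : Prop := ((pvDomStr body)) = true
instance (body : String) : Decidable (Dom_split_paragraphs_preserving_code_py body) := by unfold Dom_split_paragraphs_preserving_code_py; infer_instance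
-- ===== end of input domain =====

-- B replaces A's in_code-flag + buffer state machine by a direct recursive decomposition
-- (take a whole code block or a whole paragraph run, recurse on the rest); objective: alternative.

-- shared one-line tests / join-strip (the same Python subexpressions appear in A and B)
def pvFence (l : String) : Bool := PySem.Str.startswith (PySem.Str.strip l) "```"
def pvBlank (l : String) : Bool := PySem.Str.strip l == ""
def pvJoinStrip (bs : List String) : String := PySem.Str.strip (PySem.Str.join "\n" bs)
-- body.split("\n"): sep ≠ "" so split? is always some
def pvLines (body : String) : List String := (PySem.Str.split? body "\n").getD []

-- ===== PORT A =====
-- `buf and any(s.strip() for s in buf)`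
def pvFlushGuard (buf : List String) : Bool := !buf.isEmpty && buf.any (fun s => !pvBlank s)

-- one iteration of A's for-loop over (parts, buf, in_code)
def pvStepA (st : List String × List String × Bool) (line : String) :
    List String × List String × Bool :=
  if pvFence line then
    if !st.2.2 then
      (if pvFlushGuard st.2.1 then st.1 ++ [pvJoinStrip st.2.1] else st.1, [line], true)
    else
      (st.1 ++ [pvJoinStrip (st.2.1 ++ [line])], [], false)
  else if st.2.2 then
    (st.1, st.2.1 ++ [line], st.2.2)
  else if pvBlank line then
    (if pvFlushGuard st.2.1 then (st.1 ++ [pvJoinStrip st.2.1], [], st.2.2) else st)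
  else
    (st.1, st.2.1 ++ [line], st.2.2)

-- the flush after the loop
def pvFinish (parts buf : List String) : List String :=
  if pvFlushGuard buf then parts ++ [pvJoinStrip buf] else parts

def split_paragraphs_preserving_code_py (body : String) : List String :=
  if body == "" then []
  else
    let st := (pvLines body).foldl pvStepA ([], [], false)
    let parts := pvFinish st.1 st.2.1
    if parts.isEmpty then [PySem.Str.strip body] else parts

-- ===== PORT B =====
-- code-block lines after the opening fence, through the closing fence (or to the end), plus the rest
def pvTakeCode : List String → List String × List String
  | [] => ([], [])
  | l :: rest =>
    if pvFence l then ([l], rest)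
    else
      let p := pvTakeCode rest
      (l :: p.1, p.2)

-- maximal leading run of non-blank, non-fence lines, plus the rest
def pvTakePara : List String → List String × List String
  | [] => ([], [])
  | l :: rest =>
    if pvFence l || pvBlank l then ([], l :: rest)
    else
      let p := pvTakePara rest
      (l :: p.1, p.2)

-- termination facts for pvGo (cited in decreasing_by)
theorem pvTakeCode_snd_le (ls : List String) : (pvTakeCode ls).2.length ≤ ls.length := by
  induction ls with
  | nil => simp [pvTakeCode]
  | cons l rest ih =>
    simp only [pvTakeCode]
    split
    · simp
    · simpa using Nat.le_succ_of_le ih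

theorem pvTakePara_snd_le (ls : List String) : (pvTakePara ls).2.length ≤ ls.length := by
  induction ls with
  | nil => simp [pvTakePara]
  | cons l rest ih =>
    simp only [pvTakePara]
    split
    · simp
    · simpa using Nat.le_succ_of_le ih

def pvGo : List String → List String
  | [] => []
  | head :: rest =>
    if pvFence head then
      let p := pvTakeCode rest
      pvJoinStrip (head :: p.1) :: pvGo p.2
    else if pvBlank head then pvGo rest
    else
      let p := pvTakePara (head :: rest)
      pvJoinStrip p.1 :: pvGo p.2
termination_by ls => ls.length
decreasing_by
  · exact Nat.lt_succ_of_le (pvTakeCode_snd_le rest)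
  · simp
  · simp only [pvTakePara, *]
    simp
    exact pvTakePara_snd_le rest

def split_paragraphs_preserving_code_py_alt (body : String) : List String :=
  if body == "" then []
  else
    let parts := pvGo (pvLines body)
    if parts.isEmpty then [PySem.Str.strip body] else parts

-- ===== PRECONDITION & SPEC =====
def Spec_split_paragraphs_preserving_code_py (body : String) (out : List String) : Prop := out = split_paragraphs_preserving_code_py_alt body
instance (body : String) (out : List String) : Decidable (Spec_split_paragraphs_preserving_code_py body out) := by unfold Spec_split_paragraphs_preserving_code_py; infer_instance

-- ===== CLAIM (what is proved, stated in full; the proofs are below) =====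
def Claim_equal_split_paragraphs_preserving_code_py : Prop := ∀ (body : String), Dom_split_paragraphs_preserving_code_py body → Spec_split_paragraphs_preserving_code_py body (split_paragraphs_preserving_code_py body)

-- ===== LEMMAS AND PROOFS =====

theorem pvGuard_of_all (buf : List String) (hne : buf ≠ [])
    (h : ∀ s ∈ buf, pvBlank s = false) : pvFlushGuard buf = true := by
  cases buf with
  | nil => exact absurd rfl hne
  | cons b bs =>
    simp [pvFlushGuard]
    exact Or.inl (h b (by simp))

theorem pvGuard_of_any (buf : List String)
    (h : buf.any (fun s => !pvBlank s) = true) : pvFlushGuard buf = true := by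
  cases buf with
  | nil => simp at h
  | cons b bs => simp [pvFlushGuard, h]

-- how one step of A's loop reduces in each situation
theorem pvStepA_fence_code (parts buf : List String) (line : String)
    (hf : pvFence line = true) :
    pvStepA (parts, buf, true) line = (parts ++ [pvJoinStrip (buf ++ [line])], [], false) := by
  simp [pvStepA, hf]

theorem pvStepA_fence_flush (parts buf : List String) (line : String)
    (hf : pvFence line = true) (hg : pvFlushGuard buf = true) :
    pvStepA (parts, buf, false) line = (parts ++ [pvJoinStrip buf], [line], true) := by
  simp [pvStepA, hf, hg]

theorem pvStepA_fence_keep (parts buf : List String) (line : String)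
    (hf : pvFence line = true) (hg : pvFlushGuard buf = false) :
    pvStepA (parts, buf, false) line = (parts, [line], true) := by
  simp [pvStepA, hf, hg]

theorem pvStepA_code (parts buf : List String) (line : String)
    (hf : pvFence line = false) :
    pvStepA (parts, buf, true) line = (parts, buf ++ [line], true) := by
  simp [pvStepA, hf]

theorem pvStepA_blank_flush (parts buf : List String) (line : String)
    (hf : pvFence line = false) (hbl : pvBlank line = true) (hg : pvFlushGuard buf = true) :
    pvStepA (parts, buf, false) line = (parts ++ [pvJoinStrip buf], [], false) := by
  simp [pvStepA, hf, hbl, hg]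

theorem pvStepA_blank_keep (parts buf : List String) (line : String)
    (hf : pvFence line = false) (hbl : pvBlank line = true) (hg : pvFlushGuard buf = false) :
    pvStepA (parts, buf, false) line = (parts, buf, false) := by
  simp [pvStepA, hf, hbl, hg]

theorem pvStepA_text (parts buf : List String) (line : String)
    (hf : pvFence line = false) (hbl : pvBlank line = false) :
    pvStepA (parts, buf, false) line = (parts, buf ++ [line], false) := by
  simp [pvStepA, hf, hbl]

-- a fence line is never blank (it starts with a backtick)
theorem pvFence_not_blank (l : String) (hf : pvFence l = true) : pvBlank l = false := by
  simp [pvBlank]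
  intro hstrip
  simp [pvFence, hstrip, PySem.Str.startswith] at hf
  revert hf
  simp [PySem.Chars.startswith]

-- invariant statement while in a code block (in_code = True)
def pvCodeStmt (ls : List String) : Prop :=
  ∀ parts buf, buf.any (fun s => !pvBlank s) = true →
    pvFinish (ls.foldl pvStepA (parts, buf, true)).1 (ls.foldl pvStepA (parts, buf, true)).2.1
    = parts ++ pvJoinStrip (buf ++ (pvTakeCode ls).1) :: pvGo (pvTakeCode ls).2

-- invariant statement while outside a code block (in_code = False)
def pvMainStmt (ls : List String) : Prop :=
  ∀ parts buf, (∀ s ∈ buf, pvBlank s = false) →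
    pvFinish (ls.foldl pvStepA (parts, buf, false)).1 (ls.foldl pvStepA (parts, buf, false)).2.1
    = parts ++ (if buf = [] then pvGo ls
                else pvJoinStrip (buf ++ (pvTakePara ls).1) :: pvGo (pvTakePara ls).2)

theorem pvBoth (n : Nat) : ∀ ls : List String, ls.length ≤ n → pvCodeStmt ls ∧ pvMainStmt ls := by
  induction n with
  | zero =>
    intro ls hls
    have : ls = [] := List.eq_nil_of_length_eq_zero (Nat.le_zero.mp hls)
    subst this
    constructor
    · intro parts buf hany
      simp only [List.foldl_nil, pvTakeCode, pvGo, pvFinish, pvGuard_of_any buf hany]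
      simp
    · intro parts buf hall
      by_cases hb : buf = []
      · subst hb; simp [pvFinish, pvFlushGuard, pvGo]
      · simp only [List.foldl_nil, pvTakePara, pvGo, pvFinish, pvGuard_of_all buf hb hall]
        simp [hb]
  | succ n ih =>
    intro ls hls
    cases ls with
    | nil => exact ih [] (by simp)
    | cons head rest =>
      have hrest : rest.length ≤ n := by simpa using hls
      constructor
      -- code mode
      · intro parts buf hany
        cases hf : pvFence head with
        | true =>
          -- closing fence: emit, switch to main mode with empty buffer
          rw [List.foldl_cons, pvStepA_fence_code parts buf head hf]
          have hm := ((ih rest hrest).2) (parts ++ [pvJoinStrip (buf ++ [head])]) [] (by simp)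
          rw [hm]
          simp [pvTakeCode, hf]
        | false =>
          -- still inside the block
          rw [List.foldl_cons, pvStepA_code parts buf head hf]
          have hc := ((ih rest hrest).1) parts (buf ++ [head])
            (by simp only [List.any_append]; simp [hany])
          rw [hc]
          simp [pvTakeCode, hf]
      -- main mode
      · intro parts buf hall
        cases hf : pvFence head with
        | true =>
          -- opening fence: flush buffer (if non-trivial), enter code mode
          have hc := fun parts' => ((ih rest hrest).1) parts' [head]
            (by simp [pvFence_not_blank head hf])
          by_cases hb : buf = []
          · subst hb
            rw [List.foldl_cons, pvStepA_fence_keep parts [] head hf (by simp [pvFlushGuard]),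
              hc parts]
            simp [pvGo, hf]
          · rw [List.foldl_cons,
              pvStepA_fence_flush parts buf head hf (pvGuard_of_all buf hb hall),
              hc (parts ++ [pvJoinStrip buf])]
            simp [pvTakePara, hf, hb, pvGo]
        | false =>
          cases hbl : pvBlank head with
          | true =>
            -- blank line: flush buffer if non-trivial
            by_cases hb : buf = []
            · subst hb
              rw [List.foldl_cons, pvStepA_blank_keep parts [] head hf hbl (by simp [pvFlushGuard]),
                ((ih rest hrest).2) parts [] (by simp)]
              simp [pvGo, hf, hbl]
            · rw [List.foldl_cons,
                pvStepA_blank_flush parts buf head hf hbl (pvGuard_of_all buf hb hall),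
                ((ih rest hrest).2) (parts ++ [pvJoinStrip buf]) [] (by simp)]
              simp [pvTakePara, hf, hbl, hb, pvGo]
          | false =>
            -- content line: extend the buffer
            rw [List.foldl_cons, pvStepA_text parts buf head hf hbl,
              ((ih rest hrest).2) parts (buf ++ [head])
                (by
                  intro s hs
                  rcases List.mem_append.mp hs with h1 | h1
                  · exact hall s h1
                  · simp at h1; subst h1; exact hbl)]
            by_cases hb : buf = [] <;>
              simp [hb, pvGo, hf, hbl, pvTakePara]

-- ===== VERDICT (by name: the statement is the Claim_ definition above) =====
theorem split_paragraphs_preserving_code_py_spec : Claim_equal_split_paragraphs_preserving_code_py := by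
  intro body _
  unfold Spec_split_paragraphs_preserving_code_py
  unfold split_paragraphs_preserving_code_py split_paragraphs_preserving_code_py_alt
  by_cases hb : (body == "") = true
  · rw [if_pos hb, if_pos hb]
  · rw [if_neg hb, if_neg hb]
    have hm := ((pvBoth (pvLines body).length (pvLines body) le_rfl).2) [] [] (by simp)
    simp only [if_pos trivial, List.nil_append] at hm
    exact congrArg (fun parts => if parts.isEmpty = true then [PySem.Str.strip body] else parts) hm
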